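-- pv_equiv track=rewrite | github.com/cagancaliskan/CENG467-Midterm-310201050 | q2_ner/q2_main.py | to_bio
-- ===== SOURCE A (Python) =====
-- def to_bio(tag_seq):
--     """Normalise an IOB1 tag sequence to BIO (IOB2). Idempotent on BIO input."""
--     out, prev = [], "O"
--     for tag in tag_seq:
--         if tag.startswith("I-"):
--             etype = tag[2:]
--             # If previous tag is O or a different type, this I- is actually a B-
--             if prev == "O" or prev[2:] != etype:
--                 out.append("B-" + etype)
--             else:
--                 out.append(tag)
--         else:
--             out.append(tag)
--         prev = out[-1]
--     return out
-- ===== SOURCE B (Python) =====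
-- def to_bio(tag_seq):
--     """Run-based IOB1 -> BIO: split into maximal runs keyed by (None if tag == 'O'
--     else tag[2:]); only a run's leading tag can be a chain-starting 'I-', so promote
--     it to 'B-' + type; every other tag is copied through unchanged."""
--     key = lambda t: None if t == "O" else t[2:]
--     out = []
--     i, n = 0, len(tag_seq)
--     while i < n:
--         k = key(tag_seq[i])
--         j = i + 1
--         while j < n and key(tag_seq[j]) == k:
--             j += 1
--         first = tag_seq[i]
--         out.append("B-" + first[2:] if first.startswith("I-") else first)
--         out.extend(tag_seq[i + 1:j])
--         i = j
--     return out
-- ===== Notes on version B (the rewrite author's own statement) =====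
-- stated objective: alternative
-- what changed: Replaces A's element-by-element scan that threads a prev-tag state through every iteration with a run-based pass: the sequence is split into maximal runs keyed by (None if tag=='O' else tag[2:]); only a run's leading tag can be a chain-starting 'I-', so it alone is promoted to 'B-'+type and the rest of the run is copied through as a slice.
import Mathlib
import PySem

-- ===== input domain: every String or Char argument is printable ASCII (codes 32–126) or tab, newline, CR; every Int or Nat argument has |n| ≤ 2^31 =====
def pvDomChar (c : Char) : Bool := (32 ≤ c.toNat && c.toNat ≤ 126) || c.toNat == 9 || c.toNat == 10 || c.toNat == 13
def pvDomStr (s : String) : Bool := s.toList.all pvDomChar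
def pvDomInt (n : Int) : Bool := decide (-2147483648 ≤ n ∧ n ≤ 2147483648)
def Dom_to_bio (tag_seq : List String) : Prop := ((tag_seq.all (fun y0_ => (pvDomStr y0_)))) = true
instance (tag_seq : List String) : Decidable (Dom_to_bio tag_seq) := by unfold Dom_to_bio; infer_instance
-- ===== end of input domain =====

-- B replaces A's scalar prev-state scan with a run-based pass (group maximal runs
-- by key None-if-'O'-else tag[2:], promote only a run's leading 'I-' tag); objective: alternative.

-- ===== PORT A =====
-- one iteration of A's for-loop over state (out, prev); out[-1] is pyGet? out (-1)
def pvStepA (st : List String × String) (tag : String) : List String × String :=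
  let out :=
    if PySem.Str.startswith tag "I-" then
      let etype := PySem.Str.slice tag (some 2) none
      if st.2 = "O" ∨ PySem.Str.slice st.2 (some 2) none ≠ etype then
        st.1 ++ ["B-" ++ etype]
      else st.1 ++ [tag]
    else st.1 ++ [tag]
  (out, (PySem.List.pyGet? out (-1)).getD "")

def to_bio (tag_seq : List String) : List String :=
  (tag_seq.foldl pvStepA ([], "O")).1

-- ===== PORT B =====
-- key = None if t == "O" else t[2:]
def pvKeyB (t : String) : Option String :=
  if t = "O" then none else some (PySem.Str.slice t (some 2) none)

-- the inner while-loop of Source B: split off the maximal run with key k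
def pvTakeRun (k : Option String) : List String → List String × List String
  | [] => ([], [])
  | t :: ts =>
      if pvKeyB t = k then
        let p := pvTakeRun k ts
        (t :: p.1, p.2)
      else ([], t :: ts)

lemma pvTakeRun_rest_le (k : Option String) (ts : List String) :
    (pvTakeRun k ts).2.length ≤ ts.length := by
  induction ts with
  | nil => simp [pvTakeRun]
  | cons t ts ih =>
      simp only [pvTakeRun]
      split
      · exact Nat.le_succ_of_le ih
      · simp

-- the outer while-loop of Source B: one run per step
def to_bio_alt : List String → List String
  | [] => []
  | t :: ts =>
      let p := pvTakeRun (pvKeyB t) ts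
      (if PySem.Str.startswith t "I-" then "B-" ++ PySem.Str.slice t (some 2) none else t)
        :: (p.1 ++ to_bio_alt p.2)
  termination_by ts => ts.length
  decreasing_by exact Nat.lt_succ_of_le (pvTakeRun_rest_le _ _)

-- ===== PRECONDITION & SPEC =====
def Spec_to_bio (tag_seq : List String) (out : List String) : Prop := out = to_bio_alt tag_seq
instance (tag_seq : List String) (out : List String) : Decidable (Spec_to_bio tag_seq out) := by unfold Spec_to_bio; infer_instance

-- ===== CLAIM (what is proved, stated in full; the proofs are below) =====
def Claim_equal_to_bio : Prop := ∀ (tag_seq : List String), Dom_to_bio tag_seq → Spec_to_bio tag_seq (to_bio tag_seq)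

-- ===== LEMMAS AND PROOFS =====

-- tag[2:], proof-side abbreviation
def pvD2 (s : String) : String := PySem.Str.slice s (some 2) none

-- the element A's loop appends for input tag t after previous output prev
def pvOutA (t prev : String) : String :=
  if PySem.Str.startswith t "I-" then
    (if prev = "O" ∨ pvD2 prev ≠ pvD2 t then "B-" ++ pvD2 t else t)
  else t

-- A's loop as a structural recursion carrying prev
def pvF : List String → String → List String
  | [], _ => []
  | t :: ts, prev => pvOutA t prev :: pvF ts (pvOutA t prev)

-- the same recursion keyed by pvKeyB of the previous OUTPUT tag
def pvG : List String → Option String → List String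
  | [], _ => []
  | t :: ts, k =>
      (if PySem.Str.startswith t "I-" ∧ k ≠ pvKeyB t then "B-" ++ pvD2 t else t)
        :: pvG ts (pvKeyB t)

lemma pvD2_B (x : String) : pvD2 ("B-" ++ x) = x := by
  apply String.toList_inj.mp
  simp only [pvD2, PySem.Str.toList_slice, PySem.Chars.slice_eq_listSlice]
  rw [show ("B-" ++ x).toList = 'B' :: '-' :: x.toList by simp,
      PySem.List.slice_from _ (by norm_num)]
  simp

lemma pvB_ne_O (x : String) : ("B-" ++ x) ≠ "O" := by
  intro h
  have := congrArg String.toList h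
  simp at this

lemma pvO_not_I : PySem.Str.startswith "O" "I-" = false := by decide

lemma pv_ne_O_of_I (t : String) (ht : PySem.Str.startswith t "I-" = true) : t ≠ "O" := by
  rintro rfl; rw [pvO_not_I] at ht; exact Bool.false_ne_true ht

lemma pvKeyB_ne_iff (prev t : String) (ht : PySem.Str.startswith t "I-" = true) :
    (prev = "O" ∨ pvD2 prev ≠ pvD2 t) ↔ pvKeyB prev ≠ pvKeyB t := by
  by_cases hp : prev = "O" <;> simp [pvKeyB, hp, pv_ne_O_of_I t ht, pvD2]

lemma pvOutA_eq (t prev : String) :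
    pvOutA t prev =
      if PySem.Str.startswith t "I-" = true ∧ pvKeyB prev ≠ pvKeyB t then "B-" ++ pvD2 t else t := by
  unfold pvOutA
  by_cases ht : PySem.Str.startswith t "I-" = true
  · by_cases hc : prev = "O" ∨ pvD2 prev ≠ pvD2 t
    · rw [if_pos ht, if_pos hc, if_pos ⟨ht, (pvKeyB_ne_iff prev t ht).mp hc⟩]
    · rw [if_pos ht, if_neg hc,
          if_neg (fun h => hc ((pvKeyB_ne_iff prev t ht).mpr h.2))]
  · rw [if_neg ht, if_neg (fun h => ht h.1)]

lemma pvKeyB_pvOutA (t prev : String) : pvKeyB (pvOutA t prev) = pvKeyB t := by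
  rw [pvOutA_eq]
  by_cases h : PySem.Str.startswith t "I-" = true ∧ pvKeyB prev ≠ pvKeyB t
  · rw [if_pos h]
    simp only [pvKeyB, if_neg (pvB_ne_O (pvD2 t)), if_neg (pv_ne_O_of_I t h.1)]
    exact congrArg some (pvD2_B (pvD2 t))
  · rw [if_neg h]

-- pvF = pvG (pvKeyB prev)
lemma pvF_eq_pvG (ts : List String) : ∀ prev, pvF ts prev = pvG ts (pvKeyB prev) := by
  induction ts with
  | nil => intro prev; rfl
  | cons t ts ih =>
      intro prev
      show pvOutA t prev :: pvF ts (pvOutA t prev) = _ :: pvG ts (pvKeyB t)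
      rw [ih (pvOutA t prev), pvKeyB_pvOutA, pvOutA_eq]

lemma pvGetLast_cons (l : List String) (a d : String) :
    (a :: l).getLast?.getD d = l.getLast?.getD a := by
  cases l with
  | nil => simp
  | cons x r => simp [List.getLast?_cons]

-- A's fold equals pvF
lemma pvFoldA (ts : List String) : ∀ out prev,
    ts.foldl pvStepA (out, prev) = (out ++ pvF ts prev, (pvF ts prev).getLast?.getD prev) := by
  induction ts with
  | nil => intro out prev; simp [pvF]
  | cons t ts ih =>
      intro out prev
      have hstep : pvStepA (out, prev) t = (out ++ [pvOutA t prev], pvOutA t prev) := by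
        simp only [pvStepA, pvOutA, pvD2]
        split_ifs <;> simp [PySem.List.pyGet?, PySem.List.pyIdx?]
      calc (t :: ts).foldl pvStepA (out, prev)
          = ts.foldl pvStepA (out ++ [pvOutA t prev], pvOutA t prev) := by
            rw [List.foldl_cons, hstep]
        _ = (out ++ [pvOutA t prev] ++ pvF ts (pvOutA t prev),
             (pvF ts (pvOutA t prev)).getLast?.getD (pvOutA t prev)) := ih _ _
        _ = (out ++ pvF (t :: ts) prev, (pvF (t :: ts) prev).getLast?.getD prev) := by
            simp [pvF, List.append_assoc, pvGetLast_cons]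

-- a run whose tags all have key k passes through pvG unchanged
lemma pvG_run (r : List String) : ∀ rest k, (∀ x ∈ r, pvKeyB x = k) →
    pvG (r ++ rest) k = r ++ pvG rest k := by
  induction r with
  | nil => intro rest k _; rfl
  | cons x r ih =>
      intro rest k hall
      have hx : pvKeyB x = k := hall x (by simp)
      have hr : ∀ y ∈ r, pvKeyB y = k := fun y hy => hall y (by simp [hy])
      simp only [List.cons_append, pvG, hx]
      rw [if_neg (by simp), ih rest k hr]

-- pvTakeRun splits off a maximal run
lemma pvTakeRun_spec (ts : List String) (k : Option String) :
    ts = (pvTakeRun k ts).1 ++ (pvTakeRun k ts).2 ∧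
    (∀ x ∈ (pvTakeRun k ts).1, pvKeyB x = k) ∧
    (∀ t' ts', (pvTakeRun k ts).2 = t' :: ts' → pvKeyB t' ≠ k) := by
  induction ts with
  | nil => exact ⟨rfl, by simp [pvTakeRun], by simp [pvTakeRun]⟩
  | cons t ts ih =>
      by_cases h : pvKeyB t = k
      · obtain ⟨h1, h2, h3⟩ := ih
        refine ⟨?_, ?_, ?_⟩ <;> simp only [pvTakeRun, if_pos h]
        · simpa using h1
        · intro x hx
          rcases List.mem_cons.mp hx with rfl | hx
          · exact h
          · exact h2 x hx
        · exact h3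
      · refine ⟨?_, ?_, ?_⟩ <;> simp only [pvTakeRun, if_neg h]
        · simp
        · simp
        · intro t' ts' he
          injection he with he1 _
          subst he1
          exact h

-- B equals pvG whenever the head's key differs from k (or the head is not an 'I-' tag)
lemma pvAlt_eq_pvG (n : Nat) : ∀ ts k, ts.length ≤ n →
    (∀ t ts', ts = t :: ts' → (pvKeyB t ≠ k ∨ PySem.Str.startswith t "I-" = false)) →
    to_bio_alt ts = pvG ts k := by
  induction n with
  | zero =>
      intro ts k hlen _
      have : ts = [] := List.eq_nil_of_length_eq_zero (Nat.le_zero.mp hlen)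
      subst this; simp [to_bio_alt, pvG]
  | succ n ih =>
      intro ts k hlen hhead
      match ts with
      | [] => simp [to_bio_alt, pvG]
      | t :: ts' =>
          obtain ⟨hsplit, hrun, hmax⟩ := pvTakeRun_spec ts' (pvKeyB t)
          set p := pvTakeRun (pvKeyB t) ts' with hp
          have hlen' : p.2.length ≤ n := by
            have h1 := pvTakeRun_rest_le (pvKeyB t) ts'
            rw [← hp] at h1
            rw [List.length_cons] at hlen
            omega
          have htail : to_bio_alt p.2 = pvG p.2 (pvKeyB t) := by
            refine ih p.2 (pvKeyB t) hlen' ?_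
            intro u us hu
            exact Or.inl (hmax u us hu)
          have hheads : (if PySem.Str.startswith t "I-" then "B-" ++ PySem.Str.slice t (some 2) none else t)
              = (if PySem.Str.startswith t "I-" = true ∧ k ≠ pvKeyB t then "B-" ++ pvD2 t else t) := by
            rcases hhead t ts' rfl with hk | hs
            · by_cases hst : PySem.Str.startswith t "I-" = true
              · rw [if_pos hst, if_pos ⟨hst, Ne.symm hk⟩]; rfl
              · rw [if_neg hst, if_neg (fun h => hst h.1)]
            · rw [if_neg (fun h : PySem.Str.startswith t "I-" = true =>
                      Bool.false_ne_true (hs.symm.trans h)),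
                  if_neg (fun h => Bool.false_ne_true (hs.symm.trans h.1))]
          rw [to_bio_alt]
          simp only [← hp]
          rw [hheads, htail]
          show _ = pvG (t :: ts') k
          simp only [pvG]
          congr 1
          conv_rhs => rw [hsplit]
          exact (pvG_run p.1 p.2 (pvKeyB t) hrun).symm

lemma pv_head_cond (ts : List String) :
    ∀ t ts', ts = t :: ts' → (pvKeyB t ≠ none ∨ PySem.Str.startswith t "I-" = false) := by
  intro t ts' _
  by_cases h : t = "O"
  · right; rw [h]; exact pvO_not_I
  · left; simp [pvKeyB, h]

-- ===== VERDICT (by name: the statement is the Claim_ definition above) =====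
theorem to_bio_spec : Claim_equal_to_bio := by
  intro tag_seq _
  unfold Spec_to_bio to_bio
  rw [pvFoldA tag_seq [] "O"]
  have hO : pvKeyB "O" = none := by simp [pvKeyB]
  rw [pvAlt_eq_pvG tag_seq.length tag_seq none le_rfl (pv_head_cond tag_seq)]
  simp [pvF_eq_pvG, hO]
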